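-- pv_equiv track=rewrite | github.com/vishavjitsingh07/Python-Problems | June/Jun 29.py | no_of_subarrays
-- ===== SOURCE A (Python) =====
-- def subArr(i, j):
--     n = j - i
--     return ((n)*(n+1))//2
--
-- def no_of_subarrays(n,arr):
--     start = end = -1
--     s = 0
--     for i in arr:
--         if i == 1:
--             s += subArr(start, end)
--             start = end = i
--         else: end+=1
--     return s + subArr(start, end)
-- ===== SOURCE B (Python) =====
-- def no_of_subarrays(n, arr):
--     # Count subarrays by their RIGHT ENDPOINT: a position extends the current
--     # run of non-1 elements and contributes exactly (distance since last 1)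
--     # new subarrays ending there; no triangular formula is ever computed.
--     total = streak = 0
--     for x in arr:
--         streak = 0 if x == 1 else streak + 1
--         total += streak
--     return total
-- ===== Notes on version B (the rewrite author's own statement) =====
-- stated objective: simpler
-- what changed: B drops the per-run closed form n*(n+1)//2 entirely and counts subarrays by right endpoint: each element adds the current distance since the last 1, so no start/end markers and no division are needed.
import Mathlib
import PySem

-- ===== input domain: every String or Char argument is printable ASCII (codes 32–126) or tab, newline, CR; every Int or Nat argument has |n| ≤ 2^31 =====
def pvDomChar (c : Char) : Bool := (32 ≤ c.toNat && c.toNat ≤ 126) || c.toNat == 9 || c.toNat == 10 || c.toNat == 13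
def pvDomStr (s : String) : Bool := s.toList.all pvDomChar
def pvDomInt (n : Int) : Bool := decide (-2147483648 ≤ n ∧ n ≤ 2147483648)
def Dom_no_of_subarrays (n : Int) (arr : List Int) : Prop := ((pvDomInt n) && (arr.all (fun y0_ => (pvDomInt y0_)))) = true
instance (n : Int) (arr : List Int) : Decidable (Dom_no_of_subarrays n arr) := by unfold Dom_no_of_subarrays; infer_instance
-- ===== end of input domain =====

-- ===== PORT A =====
-- Header: B counts subarrays by right endpoint (adds the running streak each step)
-- instead of A's start/end markers with a triangular formula per run; objective: simpler.
def subArrA (i j : Int) : Int :=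
  let n := j - i
  PySem.Int.floordiv (n * (n + 1)) 2

def no_of_subarrays (n : Int) (arr : List Int) : Int :=
  let st := arr.foldl
    (fun (p : Int × Int × Int) i =>
      if i == 1 then (i, i, p.2.2 + subArrA p.1 p.2.1)
      else (p.1, p.2.1 + 1, p.2.2))
    (-1, -1, 0)
  st.2.2 + subArrA st.1 st.2.1

-- ===== PORT B =====
def no_of_subarrays_alt (n : Int) (arr : List Int) : Int :=
  let st := arr.foldl
    (fun (p : Int × Int) x =>
      let streak := if x == 1 then 0 else p.1 + 1
      (streak, p.2 + streak))
    (0, 0)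
  st.2

-- ===== PRECONDITION & SPEC =====
def Spec_no_of_subarrays (n : Int) (arr : List Int) (out : Int) : Prop := out = no_of_subarrays_alt n arr
instance (n : Int) (arr : List Int) (out : Int) : Decidable (Spec_no_of_subarrays n arr out) := by unfold Spec_no_of_subarrays; infer_instance

-- ===== CLAIM (what is proved, stated in full; the proofs are below) =====
def Claim_equal_no_of_subarrays : Prop := ∀ (n : Int) (arr : List Int), Dom_no_of_subarrays n arr → Spec_no_of_subarrays n arr (no_of_subarrays n arr)

-- ===== LEMMAS AND PROOFS =====
-- tri d = d*(d+1)//2; both programs reduce to goA, a fold over the current run length.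
def tri (d : Int) : Int := PySem.Int.floordiv (d * (d + 1)) 2

def goA : List Int → Int → Int
  | [], d => tri d
  | x :: xs, d => if x = 1 then tri d + goA xs 0 else goA xs (d + 1)

def stepA (p : Int × Int × Int) (i : Int) : Int × Int × Int :=
  if i == 1 then (i, i, p.2.2 + subArrA p.1 p.2.1)
  else (p.1, p.2.1 + 1, p.2.2)

def stepB (p : Int × Int) (x : Int) : Int × Int :=
  let streak := if x == 1 then 0 else p.1 + 1
  (streak, p.2 + streak)

theorem tri_succ (d : Int) : tri (d + 1) = tri d + (d + 1) := by
  obtain ⟨k, hk⟩ := Int.even_mul_succ_self d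
  have h1 : tri d = k := by
    rw [tri, PySem.Int.floordiv_eq_iff_of_pos (by norm_num)]; omega
  have h2 : tri (d + 1) = k + (d + 1) := by
    rw [tri, PySem.Int.floordiv_eq_iff_of_pos (by norm_num)]
    constructor <;> nlinarith
  omega

theorem goA_foldlA (arr : List Int) : ∀ (start e s : Int),
    (arr.foldl stepA (start, e, s)).2.2
      + subArrA (arr.foldl stepA (start, e, s)).1 (arr.foldl stepA (start, e, s)).2.1
      = s + goA arr (e - start) := by
  induction arr with
  | nil => intro start e s; simp [goA, subArrA, tri]
  | cons x xs ih =>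
    intro start e s
    by_cases hx : x = 1
    · simp only [List.foldl_cons, stepA, hx, beq_self_eq_true, if_true, ih, goA, if_pos rfl]
      have h1 : (1 : Int) - 1 = 0 := by ring
      rw [h1]
      simp [subArrA, tri]
      ring
    · have hx' : (x == 1) = false := by simp [hx]
      simp only [List.foldl_cons, stepA, hx', Bool.false_eq_true, if_false, ih, goA, if_neg hx]
      have : e + 1 - start = e - start + 1 := by ring
      rw [this]

theorem goA_foldlB (arr : List Int) : ∀ (d t : Int),
    (arr.foldl stepB (d, t)).2 = t - tri d + goA arr d := by
  induction arr with
  | nil => intro d t; simp [goA]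
  | cons x xs ih =>
    intro d t
    by_cases hx : x = 1
    · have hx' : (x == 1) = true := by simp [hx]
      simp only [List.foldl_cons, stepB, hx', if_true, ih, goA, if_pos hx]
      have h0 : tri 0 = 0 := by decide
      rw [h0]; ring
    · have hx' : (x == 1) = false := by simp [hx]
      simp only [List.foldl_cons, stepB, hx', Bool.false_eq_true, if_false, ih, goA, if_neg hx]
      rw [tri_succ d]; ring

-- ===== VERDICT (by name: the statement is the Claim_ definition above) =====
theorem no_of_subarrays_spec : Claim_equal_no_of_subarrays := by
  intro n arr _
  unfold Spec_no_of_subarrays no_of_subarrays no_of_subarrays_alt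
  show (arr.foldl stepA (-1, -1, 0)).2.2
      + subArrA (arr.foldl stepA (-1, -1, 0)).1 (arr.foldl stepA (-1, -1, 0)).2.1
      = (arr.foldl stepB (0, 0)).2
  rw [goA_foldlA arr (-1) (-1) 0, goA_foldlB arr 0 0]
  have h0 : (-1 : Int) - (-1) = 0 := by ring
  have ht : tri 0 = 0 := by decide
  rw [h0, ht]; ring
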